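-- pv_equiv track=rewrite | github.com/anorien90/HoneyMoon | src/forensic_engine.py | _is_public_ipv4
-- ===== SOURCE A (Python) =====
-- def _is_public_ipv4(ip_addr: str) -> bool:
--     """
--     Check if the given IP address is a public IPv4 address.
--     Returns False for private/internal IPv4, IPv6, or invalid addresses.
--
--     Note: IPv4-mapped IPv6 addresses (e.g., '::ffff:192.0.2.1') are treated as IPv6
--     and will return False. If needed, extract the IPv4 portion before calling this function.
--     """
--     if not ip_addr:
--         return False
--
--     # Check if it's IPv6 (contains colons)
--     # This includes IPv4-mapped IPv6 addresses like ::ffff:192.0.2.1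
--     if ':' in ip_addr:
--         return False
--
--     # Check if it's a valid IPv4 pattern
--     parts = ip_addr.split('.')
--     if len(parts) != 4:
--         return False
--
--     try:
--         octets = [int(p) for p in parts]
--         if not all(0 <= o <= 255 for o in octets):
--             return False
--     except ValueError:
--         return False
--
--     # Check for private/internal IP ranges (RFC 1918 + localhost + link-local)
--     # 10.0.0.0/8
--     if octets[0] == 10:
--         return False
--     # 172.16.0.0/12
--     if octets[0] == 172 and 16 <= octets[1] <= 31:
--         return False
--     # 192.168.0.0/16
--     if octets[0] == 192 and octets[1] == 168:
--         return False
--     # 127.0.0.0/8 (localhost)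
--     if octets[0] == 127:
--         return False
--     # 169.254.0.0/16 (link-local)
--     if octets[0] == 169 and octets[1] == 254:
--         return False
--     # 0.0.0.0/8
--     if octets[0] == 0:
--         return False
--     # 224.0.0.0/4 (multicast)
--     if octets[0] >= 224:
--         return False
--
--     return True
-- ===== SOURCE B (Python) =====
-- # Same parsing as A, but the octet list is built by an explicit loop and the
-- # private/reserved tests are replaced by one 32-bit integer checked against a
-- # data table of reserved address ranges.
-- _RESERVED = [
--     (0x0A000000, 0x0AFFFFFF),  # 10.0.0.0/8
--     (0xAC100000, 0xAC1FFFFF),  # 172.16.0.0/12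
--     (0xC0A80000, 0xC0A8FFFF),  # 192.168.0.0/16
--     (0x7F000000, 0x7FFFFFFF),  # 127.0.0.0/8
--     (0xA9FE0000, 0xA9FEFFFF),  # 169.254.0.0/16
--     (0x00000000, 0x00FFFFFF),  # 0.0.0.0/8
--     (0xE0000000, 0xFFFFFFFF),  # 224.0.0.0/3 (A's 'octets[0] >= 224')
-- ]
--
--
-- def _is_public_ipv4(ip_addr: str) -> bool:
--     if not ip_addr or ':' in ip_addr:
--         return False
--     parts = ip_addr.split('.')
--     if len(parts) != 4:
--         return False
--     octets = []
--     for p in parts: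
--         try:
--             octets.append(int(p))
--         except ValueError:
--             return False
--     if not all(0 <= o <= 255 for o in octets):
--         return False
--     ip = ((octets[0] * 256 + octets[1]) * 256 + octets[2]) * 256 + octets[3]
--     return not any(lo <= ip <= hi for lo, hi in _RESERVED)
-- ===== Notes on version B (the rewrite author's own statement) =====
-- stated objective: alternative
-- what changed: The seven hard-coded octet-comparison branches are replaced by folding the octets into one 32-bit integer and testing it against a data table of reserved address ranges.
import Mathlib
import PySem

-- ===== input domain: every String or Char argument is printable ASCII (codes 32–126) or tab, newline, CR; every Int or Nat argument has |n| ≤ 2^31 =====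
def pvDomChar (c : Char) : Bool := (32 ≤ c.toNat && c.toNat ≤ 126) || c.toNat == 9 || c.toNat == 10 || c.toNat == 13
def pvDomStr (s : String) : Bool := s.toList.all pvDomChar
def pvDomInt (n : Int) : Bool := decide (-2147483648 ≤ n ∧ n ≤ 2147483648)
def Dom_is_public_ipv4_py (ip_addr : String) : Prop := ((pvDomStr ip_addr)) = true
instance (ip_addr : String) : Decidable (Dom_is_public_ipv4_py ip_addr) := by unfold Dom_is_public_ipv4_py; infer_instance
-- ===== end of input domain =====

-- B replaces A's chain of hard-coded octet comparisons by one 32-bit integer checked against a table of reserved ranges (alternative decomposition, same cost).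

-- ===== PORT A =====
-- the list comprehension '[int(p) for p in parts]' inside try/except: none = some part raised ValueError
def pvOctetsA? : List String → Option (List Int)
  | [] => some []
  | p :: ps =>
    match PySem.Int.ofStr? p with
    | none => none
    | some o =>
      match pvOctetsA? ps with
      | none => none
      | some os => some (o :: os)

def is_public_ipv4_py (ip_addr : String) : Bool :=
  if ip_addr.toList.isEmpty then false
  else if PySem.Str.isIn ":" ip_addr then false
  else
    match PySem.Str.split? ip_addr "." with
    | none => false        -- unreachable: separator "." is non-empty
    | some parts =>
      if parts.length ≠ 4 then false
      else
        match pvOctetsA? parts with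
        | none => false    -- int() raised ValueError
        | some octets =>
          if !(octets.all fun o => decide (0 ≤ o) && decide (o ≤ 255)) then false
          else
            match octets with
            | [o0, o1, _o2, _o3] =>
              if o0 == 10 then false
              else if o0 == 172 && decide (16 ≤ o1) && decide (o1 ≤ 31) then false
              else if o0 == 192 && o1 == 168 then false
              else if o0 == 127 then false
              else if o0 == 169 && o1 == 254 then false
              else if o0 == 0 then false
              else if decide (224 ≤ o0) then false
              else true
            | _ => false   -- unreachable: octets has length 4

-- ===== PORT B =====
def pvReserved : List (Int × Int) :=
  [(0x0A000000, 0x0AFFFFFF), (0xAC100000, 0xAC1FFFFF), (0xC0A80000, 0xC0A8FFFF),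
   (0x7F000000, 0x7FFFFFFF), (0xA9FE0000, 0xA9FEFFFF), (0x00000000, 0x00FFFFFF),
   (0xE0000000, 0xFFFFFFFF)]

-- B's loop 'for p in parts: octets.append(int(p))' with try/except around int()
def pvOctetsB? : List String → Option (List Int)
  | [] => some []
  | p :: ps => (PySem.Int.ofStr? p).bind fun o => (pvOctetsB? ps).map (o :: ·)

def is_public_ipv4_py_alt (ip_addr : String) : Bool :=
  if ip_addr.toList.isEmpty || PySem.Str.isIn ":" ip_addr then false
  else
    match PySem.Str.split? ip_addr "." with
    | some parts =>
      if parts.length ≠ 4 then false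
      else
        match pvOctetsB? parts with
        | some octets =>
          if !(octets.all fun o => decide (0 ≤ o) && decide (o ≤ 255)) then false
          else
            -- octets[0] … octets[3]; in range: the length-4 guard ran above
            let ip := ((PySem.List.pyGetD octets 0 0 * 256 + PySem.List.pyGetD octets 1 0) * 256
                        + PySem.List.pyGetD octets 2 0) * 256 + PySem.List.pyGetD octets 3 0
            !(pvReserved.any fun r => decide (r.1 ≤ ip) && decide (ip ≤ r.2))
        | none => false    -- int() raised ValueError
    | none => false        -- unreachable: separator "." is non-empty

-- ===== PRECONDITION & SPEC =====
def Spec_is_public_ipv4_py (ip_addr : String) (out : Bool) : Prop := out = is_public_ipv4_py_alt ip_addr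
instance (ip_addr : String) (out : Bool) : Decidable (Spec_is_public_ipv4_py ip_addr out) := by unfold Spec_is_public_ipv4_py; infer_instance

-- ===== CLAIM (what is proved, stated in full; the proofs are below) =====
def Claim_equal_is_public_ipv4_py : Prop := ∀ (ip_addr : String), Dom_is_public_ipv4_py ip_addr → Spec_is_public_ipv4_py ip_addr (is_public_ipv4_py ip_addr)

-- ===== LEMMAS AND PROOFS =====

lemma pvOctetsB?_eq (ps : List String) : pvOctetsB? ps = pvOctetsA? ps := by
  induction ps with
  | nil => rfl
  | cons p ps ih =>
    simp only [pvOctetsB?, pvOctetsA?, ih]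
    cases PySem.Int.ofStr? p <;> cases pvOctetsA? ps <;> rfl

lemma pvOctetsA?_length : ∀ {ps : List String} {os : List Int}, pvOctetsA? ps = some os → os.length = ps.length := by
  intro ps
  induction ps with
  | nil => intro os h; simp only [pvOctetsA?, Option.some.injEq] at h; subst h; rfl
  | cons p ps ih =>
    intro os h
    simp only [pvOctetsA?] at h
    cases hp : PySem.Int.ofStr? p with
    | none => rw [hp] at h; exact absurd h (by simp)
    | some o =>
      rw [hp] at h
      cases hr : pvOctetsA? ps with
      | none => rw [hr] at h; exact absurd h (by simp)
      | some os' =>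
        rw [hr] at h
        cases h
        simpa using ih hr

-- Core fact: on in-range octets, A's branch chain agrees with B's range-table test.
lemma pv_core (o0 o1 o2 o3 : Int)
    (h0 : 0 ≤ o0 ∧ o0 ≤ 255) (h1 : 0 ≤ o1 ∧ o1 ≤ 255)
    (h2 : 0 ≤ o2 ∧ o2 ≤ 255) (h3 : 0 ≤ o3 ∧ o3 ≤ 255) :
    (if o0 == 10 then false
     else if o0 == 172 && decide (16 ≤ o1) && decide (o1 ≤ 31) then false
     else if o0 == 192 && o1 == 168 then false
     else if o0 == 127 then false
     else if o0 == 169 && o1 == 254 then false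
     else if o0 == 0 then false
     else if decide (224 ≤ o0) then false
     else true)
    = (!(pvReserved.any fun r =>
          decide (r.1 ≤ ((o0 * 256 + o1) * 256 + o2) * 256 + o3) &&
          decide (((o0 * 256 + o1) * 256 + o2) * 256 + o3 ≤ r.2))) := by
  simp only [pvReserved, List.any_cons, List.any_nil, Bool.or_false]
  split_ifs <;> simp_all <;> omega

-- ===== VERDICT (by name: the statement is the Claim_ definition above) =====
theorem is_public_ipv4_py_spec : Claim_equal_is_public_ipv4_py := by
  intro s _
  unfold Spec_is_public_ipv4_py is_public_ipv4_py is_public_ipv4_py_alt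
  by_cases he : s.toList.isEmpty = true
  · rw [if_pos he, if_pos (show (s.toList.isEmpty || PySem.Str.isIn ":" s) = true by simp [he])]
  by_cases hc : PySem.Str.isIn ":" s = true
  · rw [if_neg he, if_pos hc,
      if_pos (show (s.toList.isEmpty || PySem.Str.isIn ":" s) = true by rw [hc, Bool.or_true])]
  rw [if_neg he, if_neg hc,
    if_neg (show ¬(s.toList.isEmpty || PySem.Str.isIn ":" s) = true by simp [Bool.not_eq_true] at he hc ⊢; exact ⟨he, hc⟩)]
  cases hsp : PySem.Str.split? s "." with
  | none => rfl
  | some parts =>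
    by_cases hl : parts.length ≠ 4
    · simp [hl]
    simp only [hl, if_false]
    rw [pvOctetsB?_eq]
    cases ho : pvOctetsA? parts with
    | none => rfl
    | some octets =>
      have hlen : octets.length = 4 := by
        rw [pvOctetsA?_length ho]; omega
      by_cases hb : (!(octets.all fun o => decide (0 ≤ o) && decide (o ≤ 255))) = true
      · simp [hb]
      simp only [hb, if_false, Bool.false_eq_true]
      have hb' : (octets.all fun o => decide (0 ≤ o) && decide (o ≤ 255)) = true := by
        simpa using hb
      match octets, hlen, hb' with
      | [o0, o1, o2, o3], _, hb' =>
        simp only [List.all_cons, List.all_nil, Bool.and_eq_true, Bool.and_true,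
          decide_eq_true_eq] at hb'
        exact pv_core o0 o1 o2 o3 (by tauto) (by tauto) (by tauto) (by tauto)
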